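-- pv_equiv track=rewrite | github.com/Knox-AAU/KnoxKL_NJ | turtleParser/util.py | DeleteComments
-- ===== SOURCE A (Python) =====
-- def DeleteComments(text):
--     """
--     Deletes COMMENTs by scanning for (# (char)* '\\n'). '#' is used in IRIREFs and STRINGs
--
--     Input:
--         text: str - turtle text
--     Return:
--         preproText: str - turtle text without comments
--     """
--     preproText = ""
--     isCOMMENTInterpolation = False #if true, Look for '\n'
--     isIRIREFInterpolation = False #if true, Look for '>'
--     isSTRINGInterpolation = False #if true, Look for '"'
--     for i in range(len(text)):
--         c = text[i]
--
--         #End comment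
--         if isCOMMENTInterpolation:
--             if c == '\n':
--                 isCOMMENTInterpolation = False
--                 continue
--             continue
--
--         #End iriref
--         if isIRIREFInterpolation:
--             if c == '>':
--                 isIRIREFInterpolation = False
--                 preproText = preproText + c
--                 continue
--             preproText = preproText + c
--             continue
--
--         #End string
--         if isSTRINGInterpolation:
--             if c == '"':
--                 isSTRINGInterpolation = False
--                 preproText = preproText + c
--                 continue
--             preproText = preproText + c
--             continue
--
--         #Start comment
--         if c == '#':
--             isCOMMENTInterpolation = True
--             continue
--
--         #Start iriref
--         if c == '<':
--             isIRIREFInterpolation = True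
--             preproText = preproText + c
--             continue
--
--         #Start String
--         if c == '"':
--             isSTRINGInterpolation = True
--             preproText = preproText + c
--             continue
--
--         preproText = preproText + c
--     return preproText
-- ===== SOURCE B (Python) =====
-- def DeleteComments(text):
--     parts = []
--     rest = text
--     while rest:
--         if rest[0] == '#':
--             e = rest.find('\n')
--             rest = "" if e == -1 else rest[e + 1:]
--         elif rest[0] == '<':
--             e = rest.find('>', 1)
--             if e == -1:
--                 parts.append(rest)
--                 rest = ""
--             else:
--                 parts.append(rest[:e + 1])
--                 rest = rest[e + 1:]
--         elif rest[0] == '"':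
--             e = rest.find('"', 1)
--             if e == -1:
--                 parts.append(rest)
--                 rest = ""
--             else:
--                 parts.append(rest[:e + 1])
--                 rest = rest[e + 1:]
--         else:
--             e = next((k for k in range(len(rest)) if rest[k] in '#<"'), len(rest))
--             parts.append(rest[:e])
--             rest = rest[e:]
--     return "".join(parts)
-- ===== Notes on version B (the rewrite author's own statement) =====
-- stated objective: faster
-- what changed: Replaces A's char-by-char scan with three boolean mode flags by a chunked while-loop that finds the closing delimiter of each comment/IRIREF/string region (and the next special char of a plain run) with str.find, copying or skipping the whole chunk at once and joining the pieces at the end.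
import Mathlib
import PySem

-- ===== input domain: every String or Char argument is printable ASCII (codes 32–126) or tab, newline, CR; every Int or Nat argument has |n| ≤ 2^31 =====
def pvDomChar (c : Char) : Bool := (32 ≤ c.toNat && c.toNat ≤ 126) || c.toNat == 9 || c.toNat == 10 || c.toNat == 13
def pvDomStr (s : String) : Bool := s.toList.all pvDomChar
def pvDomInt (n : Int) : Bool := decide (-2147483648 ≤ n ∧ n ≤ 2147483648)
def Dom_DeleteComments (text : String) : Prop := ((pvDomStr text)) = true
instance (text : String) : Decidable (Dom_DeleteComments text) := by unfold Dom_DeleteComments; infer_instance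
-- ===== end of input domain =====

-- B replaces A's char-by-char three-flag state machine by a chunked scanner (find the next
-- delimiter, copy or skip the whole region at once with find/slice/join; measured faster in a timing run).

-- ===== PORT A =====
-- one loop step of A: state = (preproText, isCOMMENT, isIRIREF, isSTRING)
def stepA (s : List Char × Bool × Bool × Bool) (c : Char) : List Char × Bool × Bool × Bool :=
  match s with
  | (acc, co, ir, st) =>
    if co then
      if c = '\n' then (acc, false, ir, st) else (acc, co, ir, st)
    else if ir then
      if c = '>' then (acc ++ [c], co, false, st) else (acc ++ [c], co, ir, st)
    else if st then
      if c = '"' then (acc ++ [c], co, ir, false) else (acc ++ [c], co, ir, st)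
    else if c = '#' then (acc, true, ir, st)
    else if c = '<' then (acc ++ [c], co, true, st)
    else if c = '"' then (acc ++ [c], co, ir, true)
    else (acc ++ [c], co, ir, st)

def DeleteComments (text : String) : String :=
  String.ofList (text.toList.foldl stepA ([], false, false, false)).1

-- ===== PORT B =====
-- B's while loop: consume a whole comment / iriref / string / plain chunk per step.
-- fuel = remaining length (each iteration of the Python while loop shortens `rest`).
def goB : Nat → List Char → List Char
  | 0, _ => []
  | _, [] => []
  | fuel + 1, c :: rest =>
    if c = '#' then
      match List.findIdx? (· = '\n') (c :: rest) with
      | none => []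
      | some e => goB fuel ((c :: rest).drop (e + 1))
    else if c = '<' then
      match List.findIdx? (· = '>') rest with
      | none => c :: rest
      | some e => (c :: rest).take (e + 2) ++ goB fuel ((c :: rest).drop (e + 2))
    else if c = '"' then
      match List.findIdx? (· = '"') rest with
      | none => c :: rest
      | some e => (c :: rest).take (e + 2) ++ goB fuel ((c :: rest).drop (e + 2))
    else
      match List.findIdx? (fun x => x = '#' ∨ x = '<' ∨ x = '"') (c :: rest) with
      | none => c :: rest
      | some e => (c :: rest).take e ++ goB fuel ((c :: rest).drop e)

def DeleteComments_alt (text : String) : String :=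
  String.ofList (goB text.toList.length text.toList)

-- ===== PRECONDITION & SPEC =====
def Spec_DeleteComments (text : String) (out : String) : Prop := out = DeleteComments_alt text
instance (text : String) (out : String) : Decidable (Spec_DeleteComments text out) := by unfold Spec_DeleteComments; infer_instance

-- ===== CLAIM (what is proved, stated in full; the proofs are below) =====
def Claim_equal_DeleteComments : Prop := ∀ (text : String), Dom_DeleteComments text → Spec_DeleteComments text (DeleteComments text)

-- ===== LEMMAS AND PROOFS =====

-- A in comment mode skips up to and including the first '\n', then resumes normally
theorem comment_run (l : List Char) : ∀ acc,
    List.foldl stepA (acc, true, false, false) l =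
      match List.findIdx? (· = '\n') l with
      | none => (acc, true, false, false)
      | some e => List.foldl stepA (acc, false, false, false) (l.drop (e + 1)) := by
  induction l with
  | nil => intro acc; simp
  | cons c rest ih =>
    intro acc
    by_cases hc : c = '\n'
    · subst hc
      have hs : stepA (acc, true, false, false) '\n' = (acc, false, false, false) := by
        simp [stepA]
      rw [List.foldl_cons, hs]
      simp [List.findIdx?_cons]
    · have hs : stepA (acc, true, false, false) c = (acc, true, false, false) := by
        simp [stepA, hc]
      rw [List.foldl_cons, hs, ih acc]
      simp [List.findIdx?_cons, hc]
      cases List.findIdx? (fun x => decide (x = '\n')) rest <;> simp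

-- A in iriref mode copies up to and including the first '>', then resumes normally
theorem iri_run (l : List Char) : ∀ acc,
    List.foldl stepA (acc, false, true, false) l =
      match List.findIdx? (· = '>') l with
      | none => (acc ++ l, false, true, false)
      | some e => List.foldl stepA (acc ++ l.take (e + 1), false, false, false) (l.drop (e + 1)) := by
  induction l with
  | nil => intro acc; simp
  | cons c rest ih =>
    intro acc
    by_cases hc : c = '>'
    · subst hc
      have hs : stepA (acc, false, true, false) '>' = (acc ++ ['>'], false, false, false) := by
        simp [stepA]
      rw [List.foldl_cons, hs]
      simp [List.findIdx?_cons]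
    · have hs : stepA (acc, false, true, false) c = (acc ++ [c], false, true, false) := by
        simp [stepA, hc]
      rw [List.foldl_cons, hs, ih (acc ++ [c])]
      simp [List.findIdx?_cons, hc]
      cases List.findIdx? (fun x => decide (x = '>')) rest <;> simp

-- A in string mode copies up to and including the closing '"', then resumes normally
theorem str_run (l : List Char) : ∀ acc,
    List.foldl stepA (acc, false, false, true) l =
      match List.findIdx? (· = '"') l with
      | none => (acc ++ l, false, false, true)
      | some e => List.foldl stepA (acc ++ l.take (e + 1), false, false, false) (l.drop (e + 1)) := by
  induction l with
  | nil => intro acc; simp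
  | cons c rest ih =>
    intro acc
    by_cases hc : c = '"'
    · subst hc
      have hs : stepA (acc, false, false, true) '"' = (acc ++ ['"'], false, false, false) := by
        simp [stepA]
      rw [List.foldl_cons, hs]
      simp [List.findIdx?_cons]
    · have hs : stepA (acc, false, false, true) c = (acc ++ [c], false, false, true) := by
        simp [stepA, hc]
      rw [List.foldl_cons, hs, ih (acc ++ [c])]
      simp [List.findIdx?_cons, hc]
      cases List.findIdx? (fun x => decide (x = '"')) rest <;> simp

-- A in normal mode copies a chunk free of '#', '<', '"' verbatim, staying in normal mode
theorem plain_run (l : List Char) : ∀ acc,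
    (∀ c ∈ l, ¬(c = '#' ∨ c = '<' ∨ c = '"')) →
    List.foldl stepA (acc, false, false, false) l = (acc ++ l, false, false, false) := by
  induction l with
  | nil => intro acc _; simp
  | cons c rest ih =>
    intro acc h
    have hc1 : ¬c = '#' := fun e => h c (by simp) (Or.inl e)
    have hc2 : ¬c = '<' := fun e => h c (by simp) (Or.inr (Or.inl e))
    have hc3 : ¬c = '"' := fun e => h c (by simp) (Or.inr (Or.inr e))
    have hs : stepA (acc, false, false, false) c = (acc ++ [c], false, false, false) := by
      simp [stepA, hc1, hc2, hc3]
    rw [List.foldl_cons, hs, ih (acc ++ [c]) (fun d hd => h d (by simp [hd]))]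
    simp

-- the core correspondence: one B chunk = the A steps over that chunk
theorem main_run : ∀ (fuel : Nat) (l acc : List Char), l.length ≤ fuel →
    (List.foldl stepA (acc, false, false, false) l).1 = acc ++ goB fuel l := by
  intro fuel
  induction fuel with
  | zero =>
    intro l acc h
    have : l = [] := List.eq_nil_of_length_eq_zero (Nat.le_zero.mp h)
    subst this; simp [goB]
  | succ fuel ih =>
    intro l acc h
    match l with
    | [] => simp [goB]
    | c :: rest =>
      simp only [List.length_cons, Nat.add_le_add_iff_right] at h
      by_cases h1 : c = '#'
      · subst h1
        have hs : stepA (acc, false, false, false) '#' = (acc, true, false, false) := by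
          simp [stepA]
        rw [List.foldl_cons, hs, comment_run]
        rcases hfind : List.findIdx? (fun x => decide (x = '\n')) rest with _ | e
        · simp [goB, List.findIdx?_cons, hfind]
        · have hlen : (rest.drop (e + 1)).length ≤ fuel := by
            simp [List.length_drop]; omega
          rw [ih (rest.drop (e + 1)) acc hlen]
          simp [goB, List.findIdx?_cons, hfind]
      · by_cases h2 : c = '<'
        · subst h2
          have hs : stepA (acc, false, false, false) '<' = (acc ++ ['<'], false, true, false) := by
            simp [stepA]
          rw [List.foldl_cons, hs, iri_run]
          rcases hfind : List.findIdx? (fun x => decide (x = '>')) rest with _ | e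
          · simp [goB, hfind]
          · have hlen : (rest.drop (e + 1)).length ≤ fuel := by
              simp [List.length_drop]; omega
            rw [ih (rest.drop (e + 1)) (acc ++ ['<'] ++ rest.take (e + 1)) hlen]
            simp [goB, hfind]
        · by_cases h3 : c = '"'
          · subst h3
            have hs : stepA (acc, false, false, false) '"' = (acc ++ ['"'], false, false, true) := by
              simp [stepA]
            rw [List.foldl_cons, hs, str_run]
            rcases hfind : List.findIdx? (fun x => decide (x = '"')) rest with _ | e
            · simp [goB, hfind]
            · have hlen : (rest.drop (e + 1)).length ≤ fuel := by
                simp [List.length_drop]; omega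
              rw [ih (rest.drop (e + 1)) (acc ++ ['"'] ++ rest.take (e + 1)) hlen]
              simp [goB, hfind]
          · rcases hfind : List.findIdx? (fun x => decide (x = '#' ∨ x = '<' ∨ x = '"')) (c :: rest) with _ | e
            · have hall : ∀ x ∈ c :: rest, ¬(x = '#' ∨ x = '<' ∨ x = '"') := by
                intro x hx
                have := (List.findIdx?_eq_none_iff.mp hfind) x hx
                simpa using this
              rw [plain_run (c :: rest) acc hall]
              simp only [Bool.decide_or] at hfind
              simp [goB, hfind, h1, h2, h3]
            · have hpos : 0 < e := by
                rcases List.findIdx?_eq_some_iff_getElem.mp hfind with ⟨hel, hpe, _⟩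
                rcases Nat.eq_zero_or_pos e with h0 | h0
                · subst h0; simp [h1, h2, h3] at hpe
                · exact h0
              have htake : ∀ x ∈ (c :: rest).take e, ¬(x = '#' ∨ x = '<' ∨ x = '"') := by
                rcases List.findIdx?_eq_some_iff_getElem.mp hfind with ⟨hel, _, hlt⟩
                intro x hx
                rw [List.mem_take_iff_getElem] at hx
                obtain ⟨j, hj, rfl⟩ := hx
                have := hlt j (by omega)
                simpa using this
              have hlen : ((c :: rest).drop e).length ≤ fuel := by
                simp [List.length_drop]; omega
              conv_lhs => rw [(List.take_append_drop e (c :: rest)).symm]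
              rw [List.foldl_append, plain_run _ acc htake,
                ih ((c :: rest).drop e) (acc ++ (c :: rest).take e) hlen]
              simp only [Bool.decide_or] at hfind
              simp [goB, hfind, h1, h2, h3]

-- ===== VERDICT (by name: the statement is the Claim_ definition above) =====
theorem DeleteComments_spec : Claim_equal_DeleteComments := by
  intro text _
  unfold Spec_DeleteComments DeleteComments DeleteComments_alt
  rw [main_run text.toList.length text.toList [] le_rfl]
  rfl
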